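-- pv_equiv track=rewrite | github.com/zuturito/Conjuntos-de-Relaciones-Python | 7_composicion.py | crear_composicion
-- ===== SOURCE A (Python) =====
-- def proximidad(R):
--     a = {}
--     for x,y in R:
--         a.setdefault(x, set()).add(y)
--     return a
--
-- def crear_composicion(R1, R2):
--     p1 = proximidad(R1)
--     p2 = proximidad(R2)
--     composite = set()
--     for a, related in p1.items():
--         for b in related:
--             for c in p2.get(b, []):
--                 composite.add((a, c))
--     return composite
-- ===== SOURCE B (Python) =====
-- def crear_composicion(R1, R2):
--     return {(a, d) for (a, b) in R1 for (c, d) in R2 if b == c}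
-- ===== Notes on version B (the rewrite author's own statement) =====
-- stated objective: simpler
-- what changed: Drops the dict-of-sets index (proximidad) and the triple loop over its items; B is a one-line set comprehension doing a naive nested scan of R1 x R2, adding (a,d) whenever b == c.
import Mathlib
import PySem

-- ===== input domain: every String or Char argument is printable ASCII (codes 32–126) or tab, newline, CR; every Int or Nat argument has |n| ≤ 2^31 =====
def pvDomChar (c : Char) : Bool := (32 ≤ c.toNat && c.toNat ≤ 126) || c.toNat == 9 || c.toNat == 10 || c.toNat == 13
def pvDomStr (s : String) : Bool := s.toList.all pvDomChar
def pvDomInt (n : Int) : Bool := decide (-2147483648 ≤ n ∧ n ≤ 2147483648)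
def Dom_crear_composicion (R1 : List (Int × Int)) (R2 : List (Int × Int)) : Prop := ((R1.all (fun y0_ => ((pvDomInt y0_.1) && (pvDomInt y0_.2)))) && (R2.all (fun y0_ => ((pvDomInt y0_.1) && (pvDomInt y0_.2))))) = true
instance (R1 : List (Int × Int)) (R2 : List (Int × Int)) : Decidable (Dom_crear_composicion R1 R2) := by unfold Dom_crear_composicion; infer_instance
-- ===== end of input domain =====

-- B replaces A's dict-of-sets index (proximidad) + triple loop over its items by a single
-- nested-scan set comprehension over R1 × R2 (simpler, same result set; not faster).
-- Both functions return a Python SET; a set's iteration order is not modelled, so both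
-- ports return the canonical sorted (lexicographic) list of the result set's distinct
-- elements (outputs are compared as finite sets).


-- ===== PORT A =====
-- a.setdefault(x, set()).add(y) mutates the set stored under x in place: Dict.modify with default ∅.
def proximidad (R : List (Int × Int)) : PySem.Dict Int (PySem.Set Int) :=
  R.foldl (fun a xy => a.modify xy.1 [] (fun s => PySem.Set.add s xy.2)) PySem.Dict.empty

def crear_composicion (R1 : List (Int × Int)) (R2 : List (Int × Int)) : List (Int × Int) :=
  let p1 := proximidad R1
  let p2 := proximidad R2
  let composite : PySem.Set (Int × Int) :=
    p1.items.foldl (fun comp ar =>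
      ar.2.foldl (fun comp b =>
        (p2.getD b []).foldl (fun comp c => PySem.Set.add comp (ar.1, c)) comp) comp) []
  PySem.List.sorted composite (fun p => toLex p)   -- canonical list of the returned set

-- ===== PORT B =====
def crear_composicion_alt (R1 : List (Int × Int)) (R2 : List (Int × Int)) : List (Int × Int) :=
  let s : PySem.Set (Int × Int) :=
    R1.foldl (fun s ab =>
      R2.foldl (fun s cd => if ab.2 == cd.1 then PySem.Set.add s (ab.1, cd.2) else s) s) []
  PySem.List.sorted s (fun p => toLex p)   -- canonical list of the returned set

-- ===== PRECONDITION & SPEC =====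
def Spec_crear_composicion (R1 : List (Int × Int)) (R2 : List (Int × Int)) (out : List (Int × Int)) : Prop := out = crear_composicion_alt R1 R2
instance (R1 : List (Int × Int)) (R2 : List (Int × Int)) (out : List (Int × Int)) : Decidable (Spec_crear_composicion R1 R2 out) := by unfold Spec_crear_composicion; infer_instance

-- ===== CLAIM (what is proved, stated in full; the proofs are below) =====
def Claim_equal_crear_composicion : Prop := ∀ (R1 : List (Int × Int)) (R2 : List (Int × Int)), Dom_crear_composicion R1 R2 → Spec_crear_composicion R1 R2 (crear_composicion R1 R2)

-- ===== LEMMAS AND PROOFS =====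

-- generic membership through a foldl that may add elements
theorem mem_foldl_gen {β : Type} (F : PySem.Set (Int × Int) → β → PySem.Set (Int × Int))
    (P : (Int × Int) → β → Prop)
    (hF : ∀ s b x, x ∈ F s b ↔ x ∈ s ∨ P x b) :
    ∀ (l : List β) (s : PySem.Set (Int × Int)) (x : Int × Int),
      x ∈ l.foldl F s ↔ x ∈ s ∨ ∃ b ∈ l, P x b := by
  intro l
  induction l with
  | nil => simp
  | cons b l ih =>
    intro s x
    simp only [List.foldl, ih, hF, List.mem_cons, exists_eq_or_imp]
    tauto

-- generic Nodup preservation through a foldl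
theorem nodup_foldl_gen {β : Type} (F : PySem.Set (Int × Int) → β → PySem.Set (Int × Int))
    (hF : ∀ s b, s.Nodup → (F s b).Nodup) :
    ∀ (l : List β) (s : PySem.Set (Int × Int)), s.Nodup → (l.foldl F s).Nodup := by
  intro l
  induction l with
  | nil => exact fun _ h => h
  | cons b l ih => intro s hs; exact ih _ (hF s b hs)

-- the loop of proximidad: y ∈ result.getD a [] ↔ already there or (a, y) seen
theorem prox_getD_aux (R : List (Int × Int)) :
    ∀ (d : PySem.Dict Int (PySem.Set Int)) (a y : Int),
      y ∈ ((R.foldl (fun a xy => a.modify xy.1 [] (fun s => PySem.Set.add s xy.2)) d).getD a []) ↔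
        y ∈ d.getD a [] ∨ (a, y) ∈ R := by
  induction R with
  | nil => simp
  | cons xy R ih =>
    rcases xy with ⟨u, v⟩
    intro d a y
    simp only [List.foldl, ih, List.mem_cons, Prod.mk.injEq]
    rw [PySem.Dict.getD_modify]
    by_cases h : a = u
    · subst h
      simp [PySem.Set.mem_add]
      tauto
    · simp only [if_neg h]
      tauto

theorem prox_mem (R : List (Int × Int)) (a y : Int) :
    y ∈ (proximidad R).getD a [] ↔ (a, y) ∈ R := by
  have := prox_getD_aux R PySem.Dict.empty a y
  simpa [proximidad, PySem.Dict.getD_empty] using this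

theorem prox_keys_nodup (R : List (Int × Int)) : (proximidad R).keys.Nodup := by
  unfold proximidad
  exact PySem.Dict.nodup_keys_foldl_modify_key R (fun xy => xy.1) []
    (fun _ xy => fun s => PySem.Set.add s xy.2) PySem.Dict.empty (by simp)

-- characterisation of A's composite set
theorem compA_mem (R1 R2 : List (Int × Int)) (x : Int × Int) :
    x ∈ ((proximidad R1).items.foldl (fun comp ar =>
        ar.2.foldl (fun comp b =>
          ((proximidad R2).getD b []).foldl (fun comp c => PySem.Set.add comp (ar.1, c)) comp) comp)
        ([] : PySem.Set (Int × Int))) ↔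
      ∃ b, (x.1, b) ∈ R1 ∧ (b, x.2) ∈ R2 := by
  have hinner : ∀ (a1 : Int) (s : PySem.Set (Int × Int)) (b : Int) (x : Int × Int),
      x ∈ ((proximidad R2).getD b []).foldl (fun comp c => PySem.Set.add comp (a1, c)) s ↔
        x ∈ s ∨ ∃ c ∈ (proximidad R2).getD b [], x = (a1, c) :=
    fun a1 s b x => PySem.Set.mem_foldl_add _ _ _ _
  have hmid : ∀ (ar : Int × PySem.Set Int) (s : PySem.Set (Int × Int)) (x : Int × Int),
      x ∈ ar.2.foldl (fun comp b =>
          ((proximidad R2).getD b []).foldl (fun comp c => PySem.Set.add comp (ar.1, c)) comp) s ↔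
        x ∈ s ∨ ∃ b ∈ ar.2, ∃ c ∈ (proximidad R2).getD b [], x = (ar.1, c) :=
    fun ar => mem_foldl_gen _ _ (fun s b x => hinner ar.1 s b x) ar.2
  rw [mem_foldl_gen _ (fun x ar => ∃ b ∈ ar.2, ∃ c ∈ (proximidad R2).getD b [], x = (ar.1, c))
        (fun s ar x => hmid ar s x) (proximidad R1).items [] x]
  simp only [List.not_mem_nil, false_or]
  constructor
  · rintro ⟨⟨k, rel⟩, har, b, hb, c, hc, rfl⟩
    have hrel : (proximidad R1).getD k [] = rel :=
      PySem.Dict.getD_of_mem_items _ har (prox_keys_nodup R1) []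
    refine ⟨b, ?_, ?_⟩
    · exact (prox_mem R1 k b).mp (hrel ▸ hb)
    · exact (prox_mem R2 b c).mp hc
  · rintro ⟨b, h1, h2⟩
    have hb : b ∈ (proximidad R1).getD x.1 [] := (prox_mem R1 x.1 b).mpr h1
    have hcon : (proximidad R1).contains x.1 = true := by
      by_contra hc
      have : (proximidad R1).getD x.1 [] = [] :=
        PySem.Dict.getD_of_not_contains _ [] (Bool.not_eq_true _ ▸ hc)
      simp [this] at hb
    obtain ⟨v, hv⟩ : ∃ v, (proximidad R1).get? x.1 = some v := by
      cases hg : (proximidad R1).get? x.1 with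
      | none => rw [PySem.Dict.get?_eq_none_iff_contains] at hg; simp [hg] at hcon
      | some v => exact ⟨v, rfl⟩
    have hitems : (x.1, v) ∈ (proximidad R1).items := PySem.Dict.mem_items_of_get?_eq_some _ hv
    have hgv : (proximidad R1).getD x.1 [] = v := by
      rw [PySem.Dict.getD_eq_get?_getD, hv]; rfl
    exact ⟨(x.1, v), hitems, b, hgv ▸ hb, x.2, (prox_mem R2 b x.2).mpr h2, by simp⟩

theorem compA_nodup (R1 R2 : List (Int × Int)) :
    ((proximidad R1).items.foldl (fun comp ar =>
        ar.2.foldl (fun comp b =>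
          ((proximidad R2).getD b []).foldl (fun comp c => PySem.Set.add comp (ar.1, c)) comp) comp)
        ([] : PySem.Set (Int × Int))).Nodup := by
  refine nodup_foldl_gen _ ?_ _ _ List.nodup_nil
  intro s ar hs
  refine nodup_foldl_gen _ ?_ _ _ hs
  intro s b hs
  refine nodup_foldl_gen _ ?_ _ _ hs
  intro s c hs
  exact PySem.Set.nodup_add _ _ hs

-- characterisation of B's set
theorem compB_mem (R1 R2 : List (Int × Int)) (x : Int × Int) :
    x ∈ (R1.foldl (fun s ab =>
        R2.foldl (fun s cd => if ab.2 == cd.1 then PySem.Set.add s (ab.1, cd.2) else s) s)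
        ([] : PySem.Set (Int × Int))) ↔
      ∃ b, (x.1, b) ∈ R1 ∧ (b, x.2) ∈ R2 := by
  have hinner : ∀ (ab : Int × Int) (s : PySem.Set (Int × Int)) (cd : Int × Int) (x : Int × Int),
      x ∈ (if ab.2 == cd.1 then PySem.Set.add s (ab.1, cd.2) else s) ↔
        x ∈ s ∨ (ab.2 = cd.1 ∧ x = (ab.1, cd.2)) := by
    intro ab s cd x
    by_cases h : ab.2 = cd.1
    · simp [h, PySem.Set.mem_add]
    · simp [h]
  have hmid : ∀ (ab : Int × Int) (s : PySem.Set (Int × Int)) (x : Int × Int),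
      x ∈ R2.foldl (fun s cd => if ab.2 == cd.1 then PySem.Set.add s (ab.1, cd.2) else s) s ↔
        x ∈ s ∨ ∃ cd ∈ R2, ab.2 = cd.1 ∧ x = (ab.1, cd.2) :=
    fun ab => mem_foldl_gen _ _ (fun s cd x => hinner ab s cd x) R2
  rw [mem_foldl_gen _ (fun x ab => ∃ cd ∈ R2, ab.2 = cd.1 ∧ x = (ab.1, cd.2))
        (fun s ab x => hmid ab s x) R1 [] x]
  simp only [List.not_mem_nil, false_or]
  constructor
  · rintro ⟨⟨a1, b1⟩, h1, ⟨c1, d1⟩, h2, heq, rfl⟩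
    simp only at heq
    subst heq
    exact ⟨b1, h1, h2⟩
  · rintro ⟨b, h1, h2⟩
    exact ⟨(x.1, b), h1, (b, x.2), h2, rfl, by simp⟩

theorem compB_nodup (R1 R2 : List (Int × Int)) :
    (R1.foldl (fun s ab =>
        R2.foldl (fun s cd => if ab.2 == cd.1 then PySem.Set.add s (ab.1, cd.2) else s) s)
        ([] : PySem.Set (Int × Int))).Nodup := by
  refine nodup_foldl_gen _ ?_ _ _ List.nodup_nil
  intro s ab hs
  refine nodup_foldl_gen _ ?_ _ _ hs
  intro s cd hs
  split
  · exact PySem.Set.nodup_add _ _ hs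
  · exact hs

theorem main_eq (R1 R2 : List (Int × Int)) :
    crear_composicion R1 R2 = crear_composicion_alt R1 R2 := by
  simp only [crear_composicion, crear_composicion_alt]
  set S1 := (proximidad R1).items.foldl (fun comp ar =>
      ar.2.foldl (fun comp b =>
        ((proximidad R2).getD b []).foldl (fun comp c => PySem.Set.add comp (ar.1, c)) comp) comp)
      ([] : PySem.Set (Int × Int)) with hS1
  set S2 := R1.foldl (fun s ab =>
      R2.foldl (fun s cd => if ab.2 == cd.1 then PySem.Set.add s (ab.1, cd.2) else s) s)
      ([] : PySem.Set (Int × Int)) with hS2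
  have hperm : S2.Perm S1 := by
    rw [List.perm_ext_iff_of_nodup (compB_nodup R1 R2) (compA_nodup R1 R2)]
    intro a
    rw [compB_mem, compA_mem]
  have hys : (PySem.List.sorted S2 (fun p => toLex p)).Perm S1 :=
    (PySem.List.sorted_perm S2 (fun p => toLex p) false).trans hperm
  have hnd : (PySem.List.sorted S2 (fun p => toLex p)).Nodup :=
    ((PySem.List.sorted_perm S2 (fun p => toLex p) false).nodup_iff).mpr (compB_nodup R1 R2)
  have hle := PySem.List.sorted_pairwise S2 (fun p => toLex p)
  have hlt : (PySem.List.sorted S2 (fun p => toLex p)).Pairwise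
      (fun a b => (toLex a : Lex (Int × Int)) < toLex b) := by
    refine (hle.and hnd).imp ?_
    rintro a b ⟨h1, h2⟩
    exact lt_of_le_of_ne h1 (fun h => h2 (toLex.injective h))
  exact PySem.List.sorted_eq_of_perm_of_pairwise_lt S1 _ (fun p => toLex p) hys hlt

-- ===== VERDICT (by name: the statement is the Claim_ definition above) =====
theorem crear_composicion_spec : Claim_equal_crear_composicion := by
  intro R1 R2 _
  unfold Spec_crear_composicion
  exact main_eq R1 R2
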